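-- pv_equiv track=rewrite | github.com/moggan1337/TestForge | src/testforge/analysis/coverage.py | _find_uncovered_regions
-- ===== SOURCE A (Python) =====
-- from typing import List, Dict, Optional, Set, Tuple, Any, Callable
--
-- def _find_uncovered_regions(
--
--     uncovered_lines: Set[int],
-- ) -> List[Tuple[int, int]]:
--     """Find contiguous regions of uncovered lines."""
--     if not uncovered_lines:
--         return []
--
--     sorted_lines = sorted(uncovered_lines)
--     regions = []
--     start = end = sorted_lines[0]
--
--     for line in sorted_lines[1:]:
--         if line == end + 1:
--             end = line
--         else:
--             regions.append((start, end))
--             start = end = line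
--
--     regions.append((start, end))
--     return regions
-- ===== SOURCE B (Python) =====
-- from typing import List, Set, Tuple
--
--
-- def _find_uncovered_regions(
--     uncovered_lines: Set[int],
-- ) -> List[Tuple[int, int]]:
--     """Find contiguous regions of uncovered lines (boundary-detection by set membership)."""
--     s = set(uncovered_lines)
--     starts = sorted(l for l in s if l - 1 not in s)
--     ends = sorted(l for l in s if l + 1 not in s)
--     return list(zip(starts, ends))
-- ===== Notes on version B (the rewrite author's own statement) =====
-- stated objective: alternative
-- what changed: Replaces A's sort-then-linear-merge state machine with boundary detection by set membership: a line starts a region iff line-1 is not in the set and ends one iff line+1 is not in the set; the sorted starts are zipped with the sorted ends, with no adjacency comparison or accumulator at all.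
import Mathlib
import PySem

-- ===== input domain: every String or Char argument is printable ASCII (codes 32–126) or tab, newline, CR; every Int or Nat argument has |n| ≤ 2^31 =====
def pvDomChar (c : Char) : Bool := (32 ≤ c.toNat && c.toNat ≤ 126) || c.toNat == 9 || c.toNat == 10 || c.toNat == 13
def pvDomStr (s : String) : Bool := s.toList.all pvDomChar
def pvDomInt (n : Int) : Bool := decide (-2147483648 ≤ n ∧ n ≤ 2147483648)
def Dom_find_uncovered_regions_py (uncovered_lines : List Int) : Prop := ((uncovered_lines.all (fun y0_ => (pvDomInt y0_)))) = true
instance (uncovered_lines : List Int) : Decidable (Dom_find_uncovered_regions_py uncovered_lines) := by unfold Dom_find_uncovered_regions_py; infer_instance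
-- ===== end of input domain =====

-- B replaces A's sort-then-merge accumulator with boundary detection by set membership
-- (region starts = lines with line-1 absent, ends = lines with line+1 absent, sorted and zipped); alternative, same cost.

-- ===== PORT A =====
-- the for-loop over sorted_lines[1:] with state (start, end, regions)
def pvGoA : Int → Int → List (Int × Int) → List Int → List (Int × Int)
  | start, e, regions, [] => regions ++ [(start, e)]
  | start, e, regions, line :: rest =>
      if line = e + 1 then pvGoA start line regions rest
      else pvGoA line line (regions ++ [(start, e)]) rest

def find_uncovered_regions_py (uncovered_lines : List Int) : List (Int × Int) :=
  if uncovered_lines = [] then []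
  else
    match PySem.List.sorted uncovered_lines (fun x => x) false with
    | [] => []  -- unreachable: sorted of a nonempty list is nonempty
    | h :: t => pvGoA h h [] t

-- ===== PORT B =====
def find_uncovered_regions_py_alt (uncovered_lines : List Int) : List (Int × Int) :=
  let s : PySem.Set Int := PySem.Set.ofList uncovered_lines
  let starts := PySem.List.sorted (s.filter (fun l => !(PySem.Set.contains s (l - 1)))) (fun x => x) false
  let ends := PySem.List.sorted (s.filter (fun l => !(PySem.Set.contains s (l + 1)))) (fun x => x) false
  starts.zip ends

-- ===== PRECONDITION & SPEC =====
-- The Python parameter is a Set[int]; Pre_ requires the list to actually represent a set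
-- (distinct elements) — on a duplicate-bearing list A's repeated degenerate regions are an
-- artefact of the list encoding, not of any set input.
def Pre_find_uncovered_regions_py (uncovered_lines : List Int) : Prop := uncovered_lines.Nodup
instance (uncovered_lines : List Int) : Decidable (Pre_find_uncovered_regions_py uncovered_lines) := by unfold Pre_find_uncovered_regions_py; infer_instance

def pvWitness_find_uncovered_regions_py : List Int := [3, 1, 2, 7, 8]

def Spec_find_uncovered_regions_py (uncovered_lines : List Int) (out : List (Int × Int)) : Prop := out = find_uncovered_regions_py_alt uncovered_lines
instance (uncovered_lines : List Int) (out : List (Int × Int)) : Decidable (Spec_find_uncovered_regions_py uncovered_lines out) := by unfold Spec_find_uncovered_regions_py; infer_instance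

-- ===== CLAIM (what is proved, stated in full; the proofs are below) =====
def Claim_equal_find_uncovered_regions_py : Prop := ∀ (uncovered_lines : List Int), Dom_find_uncovered_regions_py uncovered_lines → Pre_find_uncovered_regions_py uncovered_lines → Spec_find_uncovered_regions_py uncovered_lines (find_uncovered_regions_py uncovered_lines)

-- ===== LEMMAS AND PROOFS =====

-- proof-side bridge: peel one maximal consecutive run off a strictly increasing list
def pvRun : Int → List Int → Int × List Int
  | e, [] => (e, [])
  | e, x :: rest => if x = e + 1 then pvRun x rest else (e, x :: rest)

theorem pvRun_len (e : Int) (xs : List Int) : (pvRun e xs).2.length ≤ xs.length := by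
  induction xs generalizing e with
  | nil => simp [pvRun]
  | cons x rest ih =>
      simp only [pvRun]
      split
      · exact le_trans (ih x) (Nat.le_succ _)
      · simp

def pvRuns : List Int → List (Int × Int)
  | [] => []
  | x :: rest =>
      let p := pvRun x rest
      (x, p.1) :: pvRuns p.2
termination_by xs => xs.length
decreasing_by
  simpa using Nat.lt_succ_of_le (pvRun_len x rest)

theorem pvRun_suffix (e : Int) (xs : List Int) : (pvRun e xs).2 <:+ xs := by
  induction xs generalizing e with
  | nil => simp [pvRun]
  | cons x rest ih =>
      simp only [pvRun]
      split
      · exact (ih x).trans (List.suffix_cons x rest)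
      · exact List.suffix_refl _

-- A's loop is exactly the run decomposition
theorem pvGoA_eq_runs (rest : List Int) :
    ∀ (start e : Int) (acc : List (Int × Int)),
      pvGoA start e acc rest
        = acc ++ (start, (pvRun e rest).1) :: pvRuns (pvRun e rest).2 := by
  induction rest with
  | nil =>
      intro start e acc
      simp [pvGoA, pvRun, pvRuns]
  | cons line rest ih =>
      intro start e acc
      by_cases h : line = e + 1
      · simp [pvGoA, pvRun, h, ih]
      · simp [pvGoA, pvRun, h, ih, pvRuns]

theorem sorted_ne_nil (uncovered_lines : List Int) (h : uncovered_lines ≠ []) :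
    PySem.List.sorted uncovered_lines (fun x => x) false ≠ [] := by
  intro hs
  apply h
  have := PySem.List.sorted_perm (xs := uncovered_lines) (key := fun x => x) (rev := false)
  rw [hs] at this
  exact (List.Perm.nil_eq this).symm

-- on a strictly increasing list, the elements whose predecessor is absent are the run heads
theorem filter_starts (rest : List Int) : ∀ (x : Int), (x :: rest).Pairwise (· < ·) →
    (x :: rest).filter (fun l => !((x :: rest).contains (l - 1))) =
      x :: (pvRun x rest).2.filter (fun l => !((pvRun x rest).2.contains (l - 1))) := by
  induction rest with
  | nil =>
      intro x _
      simp only [pvRun, List.filter]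
      norm_num [List.contains_eq_mem]
  | cons y r ih =>
      intro x hp
      have hxy : x < y := (List.pairwise_cons.1 hp).1 y (by simp)
      have hxr : ∀ l ∈ r, x < l := fun l hl => (List.pairwise_cons.1 hp).1 l (by simp [hl])
      have hyr : (y :: r).Pairwise (· < ·) := (List.pairwise_cons.1 hp).2
      have hyrlt : ∀ l ∈ r, y < l := fun l hl => (List.pairwise_cons.1 hyr).1 l hl
      have hPx : (!((x :: y :: r).contains (x - 1))) = true := by
        simp only [Bool.not_eq_true', List.contains_eq_mem, decide_eq_false_iff_not, List.mem_cons]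
        rintro (h | h | h)
        · omega
        · omega
        · exact absurd (hxr _ h) (by omega)
      by_cases hy : y = x + 1
      · have hstep : pvRun x (y :: r) = pvRun y r := by simp [pvRun, hy]
        have hPy : (!((x :: y :: r).contains (y - 1))) = false := by
          simp only [Bool.not_eq_false', List.contains_eq_mem, decide_eq_true_eq, List.mem_cons]
          exact Or.inl (by omega)
        have hcong : r.filter (fun l => !((x :: y :: r).contains (l - 1)))
            = r.filter (fun l => !((y :: r).contains (l - 1))) := by
          apply List.filter_congr
          intro l hl
          have hly := hyrlt l hl
          simp only [List.contains_eq_mem, List.mem_cons]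
          have hne : ¬ (l - 1 = x) := by omega
          simp [hne]
        have ihy := ih y hyr
        have hP'y : (!((y :: r).contains (y - 1))) = true := by
          simp only [Bool.not_eq_true', List.contains_eq_mem, decide_eq_false_iff_not, List.mem_cons]
          rintro (h | h)
          · omega
          · exact absurd (hyrlt _ h) (by omega)
        rw [List.filter_cons, if_pos hP'y] at ihy
        rw [List.filter_cons, if_pos hPx, List.filter_cons,
            if_neg (by simp only [hPy]; exact Bool.false_ne_true)]
        have htail : r.filter (fun l => !((y :: r).contains (l - 1)))
            = (pvRun y r).2.filter (fun l => !((pvRun y r).2.contains (l - 1))) := by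
          have := (List.cons.injEq _ _ _ _).mp ihy
          exact this.2
        rw [hcong, htail, hstep]
      · have hstep : pvRun x (y :: r) = (x, y :: r) := by simp [pvRun, hy]
        have hcong : (y :: r).filter (fun l => !((x :: y :: r).contains (l - 1)))
            = (y :: r).filter (fun l => !((y :: r).contains (l - 1))) := by
          apply List.filter_congr
          intro l hl
          have hne : ¬ (l - 1 = x) := by
            rcases List.mem_cons.1 hl with h | h
            · omega
            · have := hyrlt l h; omega
          simp only [List.contains_eq_mem, List.mem_cons]
          simp [hne]
        rw [List.filter_cons, if_pos hPx, hcong, hstep]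

-- and the elements whose successor is absent are the run ends
theorem filter_ends (rest : List Int) : ∀ (x : Int), (x :: rest).Pairwise (· < ·) →
    (x :: rest).filter (fun l => !((x :: rest).contains (l + 1))) =
      (pvRun x rest).1 :: (pvRun x rest).2.filter (fun l => !((pvRun x rest).2.contains (l + 1))) := by
  induction rest with
  | nil =>
      intro x _
      simp only [pvRun, List.filter]
      norm_num [List.contains_eq_mem]
  | cons y r ih =>
      intro x hp
      have hxy : x < y := (List.pairwise_cons.1 hp).1 y (by simp)
      have hxr : ∀ l ∈ r, x < l := fun l hl => (List.pairwise_cons.1 hp).1 l (by simp [hl])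
      have hyr : (y :: r).Pairwise (· < ·) := (List.pairwise_cons.1 hp).2
      have hyrlt : ∀ l ∈ r, y < l := fun l hl => (List.pairwise_cons.1 hyr).1 l hl
      have hcong : (y :: r).filter (fun l => !((x :: y :: r).contains (l + 1)))
          = (y :: r).filter (fun l => !((y :: r).contains (l + 1))) := by
        apply List.filter_congr
        intro l hl
        have hne : ¬ (l + 1 = x) := by
          rcases List.mem_cons.1 hl with h | h
          · omega
          · have := hyrlt l h; omega
        simp only [List.contains_eq_mem, List.mem_cons]
        simp [hne]
      by_cases hy : y = x + 1
      · have hstep : pvRun x (y :: r) = pvRun y r := by simp [pvRun, hy]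
        have hPx : (!((x :: y :: r).contains (x + 1))) = false := by
          simp only [Bool.not_eq_false', List.contains_eq_mem, decide_eq_true_eq, List.mem_cons]
          exact Or.inr (Or.inl (by omega))
        rw [List.filter_cons, if_neg (by simp only [hPx]; exact Bool.false_ne_true),
            hcong, ih y hyr, hstep]
      · have hstep : pvRun x (y :: r) = (x, y :: r) := by simp [pvRun, hy]
        have hPx : (!((x :: y :: r).contains (x + 1))) = true := by
          simp only [Bool.not_eq_true', List.contains_eq_mem, decide_eq_false_iff_not, List.mem_cons]
          rintro (h | h | h)
          · omega
          · exact hy h.symm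
          · have := hyrlt _ h; omega
        rw [List.filter_cons, if_pos hPx, hcong, hstep]

-- the run decomposition IS zip(starts, ends)
theorem runs_eq_zip (t : List Int) (hp : t.Pairwise (· < ·)) :
    pvRuns t = (t.filter (fun l => !(t.contains (l - 1)))).zip
               (t.filter (fun l => !(t.contains (l + 1)))) := by
  induction t using pvRuns.induct with
  | case1 => simp [pvRuns]
  | case2 x rest p ih =>
      rw [pvRuns]
      have hsub : (pvRun x rest).2.Sublist (x :: rest) :=
        ((pvRun_suffix x rest).sublist).trans (List.sublist_cons_self x rest)
      have hp2 : (pvRun x rest).2.Pairwise (· < ·) := hp.sublist hsub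
      rw [filter_starts rest x hp, filter_ends rest x hp, List.zip_cons_cons]
      exact congrArg _ (ih hp2)

-- ===== VERDICT (by name: the statement is the Claim_ definition above) =====
theorem find_uncovered_regions_py_spec : Claim_equal_find_uncovered_regions_py := by
  intro xs _ hpre
  unfold Pre_find_uncovered_regions_py at hpre
  unfold Spec_find_uncovered_regions_py find_uncovered_regions_py find_uncovered_regions_py_alt
  have hL : PySem.Set.ofList xs = xs := PySem.Set.ofList_eq_self_of_nodup _ hpre
  simp only [hL]
  have hperm : (PySem.List.sorted xs (fun x => x) false).Perm xs := PySem.List.sorted_perm xs (fun x => x) false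
  have htnd : (PySem.List.sorted xs (fun x => x) false).Nodup := hperm.nodup_iff.mpr hpre
  have hle : (PySem.List.sorted xs (fun x => x) false).Pairwise (· ≤ ·) := by
    have := PySem.List.sorted_pairwise (xs := xs) (key := fun x => x)
    simpa using this
  have hlt : (PySem.List.sorted xs (fun x => x) false).Pairwise (· < ·) :=
    (hle.and htnd).imp (fun h => lt_of_le_of_ne h.1 h.2)
  set t := PySem.List.sorted xs (fun x => x) false with ht
  have hfilter : ∀ (d : Int),
      PySem.List.sorted (xs.filter (fun l => !(PySem.Set.contains xs (l + d)))) (fun x => x) false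
        = t.filter (fun l => !(t.contains (l + d))) := by
    intro d
    apply PySem.List.sorted_eq_of_perm_of_pairwise_lt
    · have h1 : xs.filter (fun l => !(PySem.Set.contains xs (l + d)))
          = xs.filter (fun l => !(t.contains (l + d))) := by
        apply List.filter_congr
        intro l _
        have hm : l + d ∈ xs ↔ l + d ∈ t := hperm.mem_iff.symm
        simp [PySem.Set.contains_eq_listContains, List.contains_eq_mem, hm]
      rw [h1]
      exact hperm.filter _
    · simpa using hlt.filter _
  have hstarts := hfilter (-1)
  have hends := hfilter 1
  simp only [show ∀ l : Int, l + (-1) = l - 1 from fun l => by ring] at hstarts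
  rw [hstarts, hends]
  by_cases hnil : xs = []
  · subst hnil
    have ht0 : t = [] := by
      rw [ht]
      rfl
    rw [ht0]
    simp
  · simp only [hnil, if_false]
    cases hs : t with
    | nil => exact absurd (ht ▸ hs) (sorted_ne_nil xs hnil)
    | cons h tl =>
        show pvGoA h h [] tl = _
        rw [pvGoA_eq_runs]
        have hz := runs_eq_zip t hlt
        rw [hs, pvRuns] at hz
        simpa using hz
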